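-- pv_equiv track=rewrite | github.com/edumigueis/mc102-labs | lab06.py | correlacao_cruzada
-- ===== SOURCE A (Python) =====
-- def correlacao_cruzada(arr: list[int], mask: list[int]) -> list[int]:
--     ret: list[int] = []
--     for i in range((len(arr) - len(mask)) + 1):
--         sum = 0
--         for m in range(len(mask)):
--             sum += arr[i + m]*mask[m]
--         ret = ret + [sum]
--     return ret
-- ===== SOURCE B (Python) =====
-- def correlacao_cruzada(arr: list[int], mask: list[int]) -> list[int]:
--     n = len(arr) - len(mask) + 1
--     if n <= 0:
--         return []
--     acc = [0] * n
--     for m, c in enumerate(mask):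
--         acc = [a + c * x for a, x in zip(acc, arr[m:m + n])]
--     return acc
-- ===== Notes on version B (the rewrite author's own statement) =====
-- stated objective: alternative
-- what changed: B swaps the loop order: instead of recomputing each window's dot product with an inner scan and rebuilding the result list by quadratic concatenation, B allocates the output once and folds over the mask coefficients, adding each shifted, scaled copy of the array into the accumulator via zip.
import Mathlib
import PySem

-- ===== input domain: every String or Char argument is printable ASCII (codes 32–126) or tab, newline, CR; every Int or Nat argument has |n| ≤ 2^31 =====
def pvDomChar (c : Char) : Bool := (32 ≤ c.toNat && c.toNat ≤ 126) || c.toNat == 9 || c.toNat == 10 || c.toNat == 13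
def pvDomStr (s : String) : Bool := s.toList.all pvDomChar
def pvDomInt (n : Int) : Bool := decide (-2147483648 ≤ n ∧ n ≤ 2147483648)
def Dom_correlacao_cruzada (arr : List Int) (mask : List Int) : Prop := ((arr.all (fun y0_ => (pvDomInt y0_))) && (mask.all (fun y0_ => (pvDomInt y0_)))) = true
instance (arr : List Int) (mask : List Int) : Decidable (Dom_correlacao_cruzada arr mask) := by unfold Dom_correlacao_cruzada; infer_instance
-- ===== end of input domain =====

-- B replaces A's per-window inner scan (and quadratic list concatenation) by one pass over the
-- mask that adds each shifted, scaled copy of the array into a preallocated accumulator.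

-- ===== PORT A =====
-- literal port of A: outer loop over window starts, inner loop summing arr[i+m]*mask[m],
-- result extended by 'ret = ret + [sum]'. Indices i+m and m are always in range, so pyGetD is exact.
def correlacao_cruzada (arr : List Int) (mask : List Int) : List Int :=
  (PySem.List.pyRange 0 ((arr.length : Int) - (mask.length : Int) + 1) 1).foldl
    (fun ret i =>
      ret ++ [(PySem.List.pyRange 0 (mask.length : Int) 1).foldl
        (fun s m => s + PySem.List.pyGetD arr (i + m) 0 * PySem.List.pyGetD mask m 0) 0])
    []

-- ===== PORT B =====
-- literal port of Source B: fold over enumerate(mask) with accumulator acc; each step zips acc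
-- with the slice arr[m:m+n] via the zip comprehension (List.zipWith).
def correlacao_cruzada_alt (arr : List Int) (mask : List Int) : List Int :=
  let n : Int := (arr.length : Int) - (mask.length : Int) + 1
  if n ≤ 0 then []
  else
    (PySem.List.enumerate mask 0).foldl
      (fun acc mc =>
        List.zipWith (fun a x => a + mc.2 * x) acc
          (PySem.List.slice arr (some mc.1) (some (mc.1 + n))))
      (List.replicate n.toNat 0)

-- ===== PRECONDITION & SPEC =====
def Spec_correlacao_cruzada (arr : List Int) (mask : List Int) (out : List Int) : Prop := out = correlacao_cruzada_alt arr mask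
instance (arr : List Int) (mask : List Int) (out : List Int) : Decidable (Spec_correlacao_cruzada arr mask out) := by unfold Spec_correlacao_cruzada; infer_instance

-- ===== CLAIM (what is proved, stated in full; the proofs are below) =====
def Claim_equal_correlacao_cruzada : Prop := ∀ (arr : List Int) (mask : List Int), Dom_correlacao_cruzada arr mask → Spec_correlacao_cruzada arr mask (correlacao_cruzada arr mask)

-- ===== LEMMAS AND PROOFS =====

-- the common mathematical value: the dot product of mask with the window of arr starting at i
def dotIdx (arr mask : List Int) (i : Nat) : Int :=
  ((List.range mask.length).map (fun m => arr.getD (i + m) 0 * mask.getD m 0)).sum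

lemma getD_drop (xs : List Int) (k j : Nat) (d : Int) :
    (xs.drop k).getD j d = xs.getD (k + j) d := by
  simp [List.getD, List.getElem?_drop]

lemma dotIdx_cons (xs : List Int) (c : Int) (ms : List Int) (i : Nat) :
    dotIdx xs (c :: ms) i = xs.getD i 0 * c + dotIdx (xs.drop 1) ms i := by
  simp only [dotIdx, List.length_cons, List.range_succ_eq_map, List.map_cons, List.map_map,
    List.sum_cons]
  congr 1
  apply congrArg
  apply List.map_congr_left
  intro m _
  show xs.getD (i + (m + 1)) 0 * (c :: ms).getD (m + 1) 0
      = (xs.drop 1).getD (i + m) 0 * ms.getD m 0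
  rw [getD_drop]
  have h1 : i + (m + 1) = 1 + (i + m) := by omega
  rw [h1, List.getD_cons_succ]

lemma map_getD_range (l : List Int) :
    (List.range l.length).map (fun i => l.getD i 0) = l := by
  apply List.ext_getElem
  · simp
  · intro i h1 h2
    simp [List.getD, List.getElem?_eq_getElem h2]

lemma getD_zipWith (f : Int → Int → Int) (xs ys : List Int) (i : Nat)
    (hx : i < xs.length) (hy : i < ys.length) :
    (List.zipWith f xs ys).getD i 0 = f (xs.getD i 0) (ys.getD i 0) := by
  have h : i < (List.zipWith f xs ys).length := by simp [List.length_zipWith]; omega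
  simp [List.getD, hx, hy]

-- invariant of B's fold over enumerate(mask): s windows already absorbed, acc carries the partial sums
lemma bloop (arr : List Int) (nn : Nat) (ms : List Int) : ∀ (s : Nat) (acc : List Int),
    s + acc.length + ms.length ≤ arr.length + 1 → acc.length ≤ nn →
    (PySem.List.enumerate ms (s : Int)).foldl
      (fun acc mc =>
        List.zipWith (fun a x => a + mc.2 * x) acc
          (PySem.List.slice arr (some mc.1) (some (mc.1 + (nn : Int)))))
      acc
    = (List.range acc.length).map (fun i => acc.getD i 0 + dotIdx (arr.drop s) ms i) := by
  induction ms with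
  | nil =>
      intro s acc _ _
      simp [PySem.List.enumerate_nil, dotIdx]
      exact (map_getD_range acc).symm
  | cons c ms ih =>
      intro s acc hlen hnn
      have hseg : PySem.List.slice arr (some (s : Int)) (some ((s : Int) + (nn : Int)))
          = (arr.drop s).take nn := PySem.List.slice_natCast_add arr s nn
      have hseglen : ((arr.drop s).take nn).length = min nn (arr.length - s) := by
        simp [List.length_take]
      have hzlen : (List.zipWith (fun a x => a + c * x) acc ((arr.drop s).take nn)).length
          = acc.length := by
        rcases Nat.eq_zero_or_pos acc.length with h0 | h0
        · simp [List.length_zipWith, h0]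
        · simp only [List.length_zipWith, hseglen]
          simp at hlen
          omega
      have hcast : (s : Int) + 1 = ((s + 1 : Nat) : Int) := by push_cast; ring
      rw [PySem.List.enumerate_cons, List.foldl_cons, hcast, ih (s + 1)]
      · rw [hseg, hzlen]
        apply List.map_congr_left
        intro i hi
        rw [List.mem_range] at hi
        have hi2 : i < ((arr.drop s).take nn).length := by
          rw [hseglen]
          simp only [List.length_cons] at hlen
          omega
        rw [getD_zipWith _ _ _ _ hi (by omega), dotIdx_cons, List.drop_drop]
        have ht : ((arr.drop s).take nn).getD i 0 = (arr.drop s).getD i 0 := by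
          simp only [List.getD, List.getElem?_take]
          simp [Nat.lt_of_lt_of_le hi hnn]
        rw [ht]
        ring
      · rw [hseg, hzlen]
        simp at hlen ⊢
        omega
      · rw [hseg, hzlen]
        exact hnn

-- A's result is the window map
lemma a_eq_map (arr mask : List Int) :
    correlacao_cruzada arr mask
      = (List.range ((arr.length : Int) - (mask.length : Int) + 1).toNat).map
          (fun i => dotIdx arr mask i) := by
  unfold correlacao_cruzada
  rw [PySem.List.foldl_append_singleton_eq_map]
  simp only [PySem.List.pyRange_one, Int.sub_zero, List.map_map, List.nil_append]
  apply List.map_congr_left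
  intro k _
  simp only [Function.comp, zero_add]
  rw [List.foldl_map, dotIdx, List.sum_eq_foldl, List.foldl_map]
  congr 1
  funext s m
  have h1 : (k : Int) + (m : Int) = ((k + m : Nat) : Int) := by push_cast; ring
  rw [h1, PySem.List.pyGetD_natCast, PySem.List.pyGetD_natCast]

-- ===== VERDICT (by name: the statement is the Claim_ definition above) =====
theorem correlacao_cruzada_spec : Claim_equal_correlacao_cruzada := by
  intro arr mask _
  unfold Spec_correlacao_cruzada correlacao_cruzada_alt
  rw [a_eq_map]
  by_cases h : (arr.length : Int) - (mask.length : Int) + 1 ≤ 0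
  · have h0 : ((arr.length : Int) - (mask.length : Int) + 1).toNat = 0 := by omega
    simp [h, h0]
  · simp only [if_neg h]
    have hn : ((arr.length : Int) - (mask.length : Int) + 1)
        = ((((arr.length : Int) - (mask.length : Int) + 1).toNat : Nat) : Int) := by omega
    rw [hn, show ((0 : Int)) = ((0 : Nat) : Int) from rfl,
      bloop arr (((arr.length : Int) - (mask.length : Int) + 1).toNat) mask 0]
    · simp only [List.length_replicate, List.drop_zero]
      apply List.map_congr_left
      intro i hi
      rw [List.mem_range] at hi
      simp [List.getD]
    · simp only [List.length_replicate]
      omega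
    · simp
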